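-- pv_equiv track=rewrite | github.com/ericwu13/tai-robot | tests/test_daily_report.py | _trending_up_bars
-- ===== SOURCE A (Python) =====
-- def _trending_up_bars(n: int = 80) -> tuple[list[int], list[int], list[int]]:
--     """Generate synthetic uptrending bars with clear directional movement."""
--     highs, lows, closes = [], [], []
--     base = 20000
--     for i in range(n):
--         h = base + i * 30 + 50
--         l = base + i * 30 - 10
--         c = base + i * 30 + 20
--         highs.append(h)
--         lows.append(l)
--         closes.append(c)
--     return highs, lows, closes
-- ===== SOURCE B (Python) =====
-- def _trending_up_bars(n: int = 80) -> tuple[list[int], list[int], list[int]]: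
--     """Generate synthetic uptrending bars: build the close series by a +30
--     recurrence, then derive highs/lows as constant offsets of the closes."""
--     closes = []
--     c = 20020
--     for _ in range(n):
--         closes.append(c)
--         c += 30
--     highs = [x + 30 for x in closes]
--     lows = [x - 30 for x in closes]
--     return highs, lows, closes
-- ===== Notes on version B (the rewrite author's own statement) =====
-- stated objective: alternative
-- what changed: Instead of one indexed loop computing three parallel per-index formulas from the base, B builds only the close series by a running-step recurrence with no index multiplication, then derives the highs and lows in two separate passes as constant offsets of the closes.
import Mathlib
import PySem

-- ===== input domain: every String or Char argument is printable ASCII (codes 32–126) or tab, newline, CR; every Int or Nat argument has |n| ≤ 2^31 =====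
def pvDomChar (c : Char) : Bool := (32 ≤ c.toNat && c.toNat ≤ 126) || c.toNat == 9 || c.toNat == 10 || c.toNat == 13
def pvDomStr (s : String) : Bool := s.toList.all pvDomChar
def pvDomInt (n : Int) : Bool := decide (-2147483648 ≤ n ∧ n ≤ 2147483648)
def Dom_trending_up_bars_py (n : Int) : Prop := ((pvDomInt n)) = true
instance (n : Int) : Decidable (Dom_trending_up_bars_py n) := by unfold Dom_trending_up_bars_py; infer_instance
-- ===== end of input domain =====

-- B builds the close series by a +30 running recurrence, then derives highs/lows as constant offsets (alternative decomposition).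


-- ===== PORT A =====
-- for i in range(n): append base+i*30+50 / -10 / +20 to the three accumulators
def trending_up_bars_py (n : Int) : List Int × List Int × List Int :=
  let base : Int := 20000
  (PySem.List.pyRange 0 n 1).foldl
    (fun (acc : List Int × List Int × List Int) i =>
      let h := base + i * 30 + 50
      let l := base + i * 30 - 10
      let c := base + i * 30 + 20
      (acc.1 ++ [h], acc.2.1 ++ [l], acc.2.2 ++ [c]))
    ([], [], [])

-- ===== PORT B =====
-- closes by a running +30 recurrence (range(n) used only as a counter), then highs/lows as offset maps
def trending_up_bars_py_alt (n : Int) : List Int × List Int × List Int :=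
  let st := (PySem.List.pyRange 0 n 1).foldl
    (fun (p : List Int × Int) _ => (p.1 ++ [p.2], p.2 + 30)) ([], (20020 : Int))
  let closes := st.1
  let highs := closes.map (fun x => x + 30)
  let lows := closes.map (fun x => x - 30)
  (highs, lows, closes)

-- ===== PRECONDITION & SPEC =====
def Spec_trending_up_bars_py (n : Int) (out : List Int × List Int × List Int) : Prop := out = trending_up_bars_py_alt n
instance (n : Int) (out : List Int × List Int × List Int) : Decidable (Spec_trending_up_bars_py n out) := by unfold Spec_trending_up_bars_py; infer_instance

-- ===== CLAIM (what is proved, stated in full; the proofs are below) =====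
def Claim_equal_trending_up_bars_py : Prop := ∀ (n : Int), Dom_trending_up_bars_py n → Spec_trending_up_bars_py n (trending_up_bars_py n)

-- ===== LEMMAS AND PROOFS =====

-- A's three-accumulator append loop is three maps.
theorem pv_foldl_three (l : List Int) (f g h : Int → Int) (a b c : List Int) :
    l.foldl (fun (acc : List Int × List Int × List Int) i =>
      (acc.1 ++ [f i], acc.2.1 ++ [g i], acc.2.2 ++ [h i])) (a, b, c)
    = (a ++ l.map f, b ++ l.map g, c ++ l.map h) := by
  induction l generalizing a b c with
  | nil => simp
  | cons x xs ih => simp [List.foldl_cons, ih]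

-- B's recurrence loop ignores the elements: its state after a list depends only on the length.
theorem pv_foldl_rec (l : List Int) (cs : List Int) (c : Int) :
    l.foldl (fun (p : List Int × Int) _ => (p.1 ++ [p.2], p.2 + 30)) (cs, c)
    = (cs ++ (List.range l.length).map (fun k : Nat => c + 30 * (k : Int)), c + 30 * l.length) := by
  induction l generalizing cs c with
  | nil => simp
  | cons x xs ih =>
    simp only [List.foldl_cons, ih, List.length_cons, List.range_succ_eq_map, List.map_cons,
      List.map_map, Prod.mk.injEq, List.append_assoc, List.singleton_append]
    have hf : ((fun k : Nat => c + 30 * (k : Int)) ∘ Nat.succ)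
        = fun k : Nat => c + 30 + 30 * (k : Int) := by
      funext k; simp [Function.comp]; push_cast; ring
    rw [hf]
    refine ⟨by norm_num, by push_cast; ring⟩

-- ===== VERDICT (by name: the statement is the Claim_ definition above) =====
theorem trending_up_bars_py_spec : Claim_equal_trending_up_bars_py := by
  intro n _
  show trending_up_bars_py n = trending_up_bars_py_alt n
  unfold trending_up_bars_py trending_up_bars_py_alt
  rw [PySem.List.pyRange_one 0 n]
  simp only [pv_foldl_three, pv_foldl_rec, List.nil_append, List.map_map, List.length_map,
    List.length_range]
  simp only [Prod.mk.injEq, sub_zero]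
  refine ⟨?_, ?_, ?_⟩ <;>
    · apply List.map_congr_left; intro k _; simp [Function.comp]; ring
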